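-- pv_equiv track=rewrite | github.com/Gabriel-Xu/cryptography | affine-cipher.py | affine_n_encode
-- ===== SOURCE A (Python) =====
-- alpha = "ABCDEFGHIJKLMNOPQRSTUVWXYZ"
--
-- def convert_to_num(ngraph):
--     num=0
--     for index, value in enumerate(ngraph):
--         num+=alpha.index(value)*(26**index)
--     return num
--
-- def convert_to_text_helper(num, n, c, ngraph):
--     if c>0:
--         ngraph+=alpha[(num%(26**(n-c+1)))//(26**(n-c))]
--         return convert_to_text_helper(num-(num%(26**(n-c+1)))//(26**(n-c)), n, c-1, ngraph)
--     else:
--         return ngraph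
--
-- def convert_to_text(num, n):
--     return convert_to_text_helper(num, n, n, "")
--
-- def affine_n_encode(text, n, a, b):
--     output=""
--     for index in range(0, len(text), n):
--         if index+n>len(text):
--             x = text[index:index+n] + "X" * (index+n-len(text))
--         else:
--             x = text[index:index+n]
--         y = (a*convert_to_num(x)+b)%(26**n)
--         output+=convert_to_text(y, n)
--     return output
-- ===== SOURCE B (Python) =====
-- alpha = "ABCDEFGHIJKLMNOPQRSTUVWXYZ"
--
-- def affine_n_encode(text, n, a, b):
--     out = []
--     for i in range(0, len(text), n):
--         block = text[i:i+n].ljust(n, "X")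
--         x = 0
--         for ch in reversed(block):          # base-26 Horner; little-endian value
--             x = x * 26 + alpha.index(ch)
--         y = (a * x + b) % (26 ** n)
--         for _ in range(n):                  # iterative little-endian decode
--             y, d = divmod(y, 26)
--             out.append(alpha[d])
--     return "".join(out)
-- ===== Notes on version B (the rewrite author's own statement) =====
-- stated objective: alternative
-- what changed: The recursive decoder that subtracts masked digits (alpha[(num%(26**(n-c+1)))//(26**(n-c))]) is replaced by an iterative divmod(y,26) loop emitting little-endian digits, and the enumerate-with-powers encoder by a base-26 Horner fold over the reversed block; output is collected in a list and joined once.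
import Mathlib
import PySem

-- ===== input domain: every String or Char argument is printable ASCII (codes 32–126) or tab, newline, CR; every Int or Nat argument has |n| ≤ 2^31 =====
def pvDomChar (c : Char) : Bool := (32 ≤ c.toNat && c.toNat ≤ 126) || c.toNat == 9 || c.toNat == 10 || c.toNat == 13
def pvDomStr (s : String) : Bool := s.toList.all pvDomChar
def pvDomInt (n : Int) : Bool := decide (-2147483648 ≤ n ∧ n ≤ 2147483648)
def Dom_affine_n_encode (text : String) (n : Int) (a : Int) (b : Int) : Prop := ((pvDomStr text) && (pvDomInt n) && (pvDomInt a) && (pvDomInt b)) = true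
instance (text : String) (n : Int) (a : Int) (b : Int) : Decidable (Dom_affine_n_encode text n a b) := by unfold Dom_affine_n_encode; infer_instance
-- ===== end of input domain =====

-- B replaces A's recursive positional-power decoder by an iterative divmod loop and the
-- enumerate-with-powers encoder by a base-26 Horner fold over the reversed block (objective: alternative).

def pvAlpha : List Char := "ABCDEFGHIJKLMNOPQRSTUVWXYZ".toList

-- ===== PORT A =====
def convert_to_num (ngraph : List Char) : Int :=
  (PySem.List.enumerate ngraph 0).foldl
    (fun num p =>
      num + (((PySem.List.index? pvAlpha p.2).getD 0 : Nat) : Int) * 26 ^ p.1.toNat) 0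
-- alpha.index raises ValueError on a char not in alpha (excluded by Pre_); getD 0 is never the raising case inside Pre_.

-- exponents 26**(n-c), 26**(n-c+1): in every call A makes, n-c ≥ 0, so .toNat is exact;
-- alpha[d] is always in range in A's calls (0 ≤ d < 26), so pyGetD's default is never used.
def convert_to_text_helper (num n c : Int) (ngraph : List Char) : List Char :=
  if _h : 0 < c then
    let d := PySem.Int.floordiv (PySem.Int.mod num (26 ^ (n - c + 1).toNat)) (26 ^ (n - c).toNat)
    convert_to_text_helper (num - d) n (c - 1) (ngraph ++ [PySem.List.pyGetD pvAlpha d 'A'])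
  else ngraph
termination_by c.toNat
decreasing_by omega

def convert_to_text (num n : Int) : List Char :=
  convert_to_text_helper num n n []

def affine_n_encode (text : String) (n : Int) (a : Int) (b : Int) : String :=
  String.ofList <|
    (PySem.List.pyRange 0 (text.toList.length : Int) n).foldl
      (fun (output : List Char) (index : Int) =>
        let x :=
          if index + n > (text.toList.length : Int) then
            PySem.List.slice text.toList (some index) (some (index + n)) ++
              PySem.List.pyRepeat ['X'] (index + n - (text.toList.length : Int))
          else
            PySem.List.slice text.toList (some index) (some (index + n))
        -- 26**n: the loop body only runs when n > 0, where .toNat is exact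
        let y := PySem.Int.mod (a * convert_to_num x + b) (26 ^ n.toNat)
        output ++ convert_to_text y n) []

-- ===== PORT B =====
-- 'for _ in range(n): y, d = divmod(y, 26); out.append(alpha[d])'
def pvDigitsLoop (y : Int) (k : Nat) (out : List Char) : List Char :=
  match k with
  | 0 => out
  | Nat.succ k =>
    match PySem.Int.divmod? y 26 with
    | some (q, r) => pvDigitsLoop q k (out ++ [PySem.List.pyGetD pvAlpha r 'A'])
    | none => out  -- unreachable: 26 ≠ 0

def affine_n_encode_alt (text : String) (n : Int) (a : Int) (b : Int) : String :=
  String.ofList <|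
    (PySem.List.pyRange 0 (text.toList.length : Int) n).foldl
      (fun (out : List Char) (i : Int) =>
        -- text[i:i+n].ljust(n, "X"), ljust ported by hand (exact: natural subtraction clamps like ljust)
        let s := PySem.List.slice text.toList (some i) (some (i + n))
        let block := s ++ List.replicate (n.toNat - s.length) 'X'
        let x := block.reverse.foldl
          (fun x ch => x * 26 + (((PySem.List.index? pvAlpha ch).getD 0 : Nat) : Int)) 0
        let y := PySem.Int.mod (a * x + b) (26 ^ n.toNat)
        pvDigitsLoop y n.toNat out) []

-- ===== PRECONDITION & SPEC =====
-- Pre_ is exactly where Python A returns: n = 0 makes range raise ValueError, and with n > 0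
-- alpha.index raises ValueError on any character outside A–Z; with n < 0 the loop is empty.
def Pre_affine_n_encode (text : String) (n : Int) (a : Int) (b : Int) : Prop :=
  n < 0 ∨ (0 < n ∧ text.toList.all (fun c => pvAlpha.contains c) = true)
instance (text : String) (n : Int) (a : Int) (b : Int) : Decidable (Pre_affine_n_encode text n a b) := by
  unfold Pre_affine_n_encode; infer_instance

def pvWitness_affine_n_encode : String × Int × Int × Int := ("HELLO", 2, 3, 5)

def Spec_affine_n_encode (text : String) (n : Int) (a : Int) (b : Int) (out : String) : Prop := out = affine_n_encode_alt text n a b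
instance (text : String) (n : Int) (a : Int) (b : Int) (out : String) : Decidable (Spec_affine_n_encode text n a b out) := by unfold Spec_affine_n_encode; infer_instance

-- ===== CLAIM (what is proved, stated in full; the proofs are below) =====
def Claim_equal_affine_n_encode : Prop := ∀ (text : String) (n : Int) (a : Int) (b : Int), Dom_affine_n_encode text n a b → Pre_affine_n_encode text n a b → Spec_affine_n_encode text n a b (affine_n_encode text n a b)

-- ===== LEMMAS AND PROOFS =====

-- A's enumerate-with-powers sum equals B's Horner fold over the reversed list.
theorem pv_num_horner_aux (l : List Char) : ∀ (s : Nat) (acc : Int),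
    (PySem.List.enumerate l (s : Int)).foldl
      (fun num p =>
        num + (((PySem.List.index? pvAlpha p.2).getD 0 : Nat) : Int) * 26 ^ p.1.toNat) acc
    = acc + 26 ^ s *
        (l.reverse.foldl
          (fun x ch => x * 26 + (((PySem.List.index? pvAlpha ch).getD 0 : Nat) : Int)) 0) := by
  induction l with
  | nil => intro s acc; simp [PySem.List.enumerate]
  | cons x xs ih =>
    intro s acc
    rw [PySem.List.enumerate_cons]
    have hcast : (s : Int) + 1 = ((s + 1 : Nat) : Int) := by push_cast; ring
    simp only [List.foldl_cons, hcast, ih (s + 1)]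
    rw [List.reverse_cons, List.foldl_append]
    simp only [List.foldl_cons, List.foldl_nil, Int.toNat_natCast]
    ring

theorem pv_num_horner (l : List Char) :
    convert_to_num l
      = l.reverse.foldl
          (fun x ch => x * 26 + (((PySem.List.index? pvAlpha ch).getD 0 : Nat) : Int)) 0 := by
  have h := pv_num_horner_aux l 0 0
  simpa [convert_to_num] using h

theorem pv_sub_div (a d M : Nat) (hM : 0 < M) (hd : d ≤ a % M) : (a - d) / M = a / M := by
  have h1 := Nat.div_add_mod a M
  have h2 : a - d = M * (a / M) + (a % M - d) := by omega
  have h3 : a % M - d < M := by have := Nat.mod_lt a hM; omega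
  rw [h2, Nat.mul_add_div hM, Nat.div_eq_of_lt h3, Nat.add_zero]

theorem pv_cast_pow (j : Nat) : ((26 ^ j : Nat) : Int) = (26 : Int) ^ j := by push_cast; ring

-- one unfolded step of B's divmod loop (26 ≠ 0, so divmod? is some)
theorem pvDigitsLoop_succ (y : Int) (k : Nat) (out : List Char) :
    pvDigitsLoop y (k + 1) out
      = pvDigitsLoop (y.fdiv 26) k (out ++ [PySem.List.pyGetD pvAlpha (y.fmod 26) 'A']) := rfl

-- A's masked-subtraction recursion produces, at position j = n-c, exactly the base-26 digits of num/26^j.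
theorem pv_helper_eq : ∀ (k : Nat) (n c : Int) (a : Nat) (g : List Char),
    c = (k : Int) → c ≤ n →
    convert_to_text_helper (a : Int) n c g
      = pvDigitsLoop ((a / 26 ^ (n - c).toNat : Nat) : Int) k g := by
  intro k
  induction k with
  | zero =>
    intro n c a g hc _
    subst hc
    rw [convert_to_text_helper, dif_neg (by omega)]
    rfl
  | succ k ih =>
    intro n c a g hc hcn
    have hc0 : 0 < c := by omega
    have hjc : (n - c + 1).toNat = (n - c).toNat + 1 := by omega
    set j := (n - c).toNat with hj
    have hMpos : (0 : Int) < 26 ^ (j + 1) := by positivity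
    have hmpos : (0 : Int) < 26 ^ j := by positivity
    rw [convert_to_text_helper, dif_pos hc0]
    simp only [hjc, ← hj]
    have hd : PySem.Int.floordiv (PySem.Int.mod (a : Int) (26 ^ (j + 1))) (26 ^ j)
        = ((a % 26 ^ (j + 1) / 26 ^ j : Nat) : Int) := by
      rw [PySem.Int.mod_eq_emod_of_pos hMpos, PySem.Int.floordiv_eq_ediv_of_pos hmpos,
        ← pv_cast_pow (j + 1), ← pv_cast_pow j, ← Int.natCast_mod, ← Int.natCast_div]
    set dN : Nat := a % 26 ^ (j + 1) / 26 ^ j with hdN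
    have hdN26 : dN = a / 26 ^ j % 26 := by
      rw [hdN, pow_succ, Nat.mod_mul_right_div_self]
    have hdle : dN ≤ a % 26 ^ (j + 1) := Nat.div_le_self _ _
    have hdlea : dN ≤ a := le_trans hdle (Nat.mod_le _ _)
    have hsub : (a : Int) - ((dN : Nat) : Int) = ((a - dN : Nat) : Int) := by omega
    rw [hd, hsub]
    have hrec := ih n (c - 1) (a - dN) (g ++ [PySem.List.pyGetD pvAlpha ((dN : Nat) : Int) 'A'])
      (by omega) (by omega)
    have hjc1 : (n - (c - 1)).toNat = j + 1 := by omega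
    rw [hjc1] at hrec
    rw [hrec]
    have hdiv : (a - dN) / 26 ^ (j + 1) = a / 26 ^ (j + 1) :=
      pv_sub_div a dN (26 ^ (j + 1)) (by positivity) hdle
    have hfd : ((a / 26 ^ j : Nat) : Int).fdiv 26 = ((a / 26 ^ j / 26 : Nat) : Int) := by
      rw [Int.fdiv_eq_ediv, if_pos (Or.inl (by norm_num))]
      push_cast
      ring
    have hfm : ((a / 26 ^ j : Nat) : Int).fmod 26 = ((a / 26 ^ j % 26 : Nat) : Int) := by
      rw [Int.fmod_eq_emod, if_pos (Or.inl (by norm_num))]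
      push_cast
      ring
    rw [pvDigitsLoop_succ, hfd, hfm, Nat.div_div_eq_div_mul, ← pow_succ, hdiv, ← hdN26]

theorem pv_digits_append : ∀ (k : Nat) (y : Int) (g g' : List Char),
    pvDigitsLoop y k (g ++ g') = g ++ pvDigitsLoop y k g' := by
  intro k
  induction k with
  | zero => intro y g g'; rfl
  | succ k ih =>
    intro y g g'
    rw [pvDigitsLoop_succ, pvDigitsLoop_succ, List.append_assoc, ih]

theorem pv_text_eq (num n : Int) (h0 : 0 ≤ num) (hn : 0 ≤ n) :
    convert_to_text num n = pvDigitsLoop num n.toNat [] := by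
  have hnum : num = ((num.toNat : Nat) : Int) := (Int.toNat_of_nonneg h0).symm
  rw [convert_to_text, hnum, pv_helper_eq n.toNat n n num.toNat [] (by omega) le_rfl]
  simp

-- A's slice-plus-pad chunk equals B's ljust chunk for an index inside the text.
theorem pv_chunk (t : List Char) (i n : Int) (h0 : 0 ≤ i) (hi : i < (t.length : Int)) (hn : 0 < n) :
    (if i + n > (t.length : Int) then
        PySem.List.slice t (some i) (some (i + n)) ++
          PySem.List.pyRepeat ['X'] (i + n - (t.length : Int))
      else PySem.List.slice t (some i) (some (i + n)))
    = PySem.List.slice t (some i) (some (i + n)) ++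
        List.replicate (n.toNat - (PySem.List.slice t (some i) (some (i + n))).length) 'X' := by
  have hlen := PySem.List.length_slice t i (i + n)
  have hci : PySem.List.clampIdx t.length i = i.toNat := by
    unfold PySem.List.clampIdx
    rw [if_neg (by omega)]
    omega
  have hcin : PySem.List.clampIdx t.length (i + n) = min (i + n).toNat t.length := by
    unfold PySem.List.clampIdx
    rw [if_neg (by omega)]
  rw [hci, hcin] at hlen
  by_cases h : i + n > (t.length : Int)
  · rw [if_pos h, PySem.List.pyRepeat_singleton]
    congr 2
    omega
  · rw [if_neg h]
    have hz : n.toNat - (PySem.List.slice t (some i) (some (i + n))).length = 0 := by omega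
    rw [hz, List.replicate_zero, List.append_nil]

theorem pv_pyRange_neg_empty (b s : Int) (hb : 0 ≤ b) (hs : s < 0) :
    PySem.List.pyRange 0 b s = [] := by
  simp only [PySem.List.pyRange]
  rw [if_neg (by omega), if_neg (by omega), if_neg (by omega)]
  simp

-- ===== VERDICT (by name: the statement is the Claim_ definition above) =====
theorem affine_n_encode_spec : Claim_equal_affine_n_encode := by
  unfold Claim_equal_affine_n_encode
  intro text n a b _ hpre
  unfold Spec_affine_n_encode affine_n_encode affine_n_encode_alt
  rcases hpre with hneg | ⟨hn, _⟩
  · rw [pv_pyRange_neg_empty _ _ (Int.natCast_nonneg _) hneg]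
    rfl
  · congr 1
    apply PySem.List.foldl_congr_mem
    intro acc i hi
    rw [PySem.List.mem_pyRange_iff_of_pos hn] at hi
    obtain ⟨hi0, hilen, -⟩ := hi
    dsimp only
    rw [pv_chunk text.toList i n hi0 hilen hn]
    rw [pv_num_horner]
    set y := PySem.Int.mod
      (a * (PySem.List.slice text.toList (some i) (some (i + n)) ++
            List.replicate
              (n.toNat - (PySem.List.slice text.toList (some i) (some (i + n))).length)
              'X').reverse.foldl
          (fun x ch => x * 26 + (((PySem.List.index? pvAlpha ch).getD 0 : Nat) : Int)) 0 + b)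
      (26 ^ n.toNat) with hy
    have hy0 : 0 ≤ y := PySem.Int.mod_nonneg _ (by positivity)
    rw [pv_text_eq y n hy0 (by omega)]
    have hsplit := pv_digits_append n.toNat y acc []
    rw [List.append_nil] at hsplit
    rw [hsplit]
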